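-- pv_equiv track=rewrite | github.com/HisAtri/MiniServer | def_global.py | get_first_path
-- ===== SOURCE A (Python) =====
-- def get_first_path(path):
--     # 去除开头和结尾的空格
--     path = path.strip()
--     # 去除结尾的斜杠
--     path = path.rstrip('/')
--     # 拆分路径
--     path_components = path.split('/')
--     # 返回第一个非空路径
--     for component in path_components:
--         if component != '':
--             return component
--     return '/'
-- ===== SOURCE B (Python) =====
-- def get_first_path(path):
--     # closed-form: the first non-empty component is whatever follows the leading
--     # slashes, up to the next slash
--     trimmed = path.strip().rstrip('/').lstrip('/')
--     i = trimmed.find('/')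
--     first = trimmed if i < 0 else trimmed[:i]
--     return first if first else '/'
-- ===== Notes on version B (the rewrite author's own statement) =====
-- stated objective: simpler
-- what changed: Replaces splitting the path into components and scanning for the first non-empty one with closed-form trimming: strip leading slashes after the rstrip and cut at the first remaining slash found by str.find.
import Mathlib
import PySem

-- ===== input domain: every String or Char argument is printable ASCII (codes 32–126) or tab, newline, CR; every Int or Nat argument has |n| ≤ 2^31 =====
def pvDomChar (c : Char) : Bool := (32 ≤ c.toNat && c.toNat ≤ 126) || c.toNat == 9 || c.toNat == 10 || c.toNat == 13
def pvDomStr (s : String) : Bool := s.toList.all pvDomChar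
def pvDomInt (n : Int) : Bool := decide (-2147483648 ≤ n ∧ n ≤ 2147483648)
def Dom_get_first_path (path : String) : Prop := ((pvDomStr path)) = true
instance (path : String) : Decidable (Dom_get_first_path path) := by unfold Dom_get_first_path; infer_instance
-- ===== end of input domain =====

-- B replaces A's split-then-search loop by closed-form trimming (strip slashes, cut at the
-- first remaining '/'); objective: simpler.


-- ===== PORT A =====
-- str.rstrip('/'): drop trailing '/' characters (hand port, exact: the stripped set is {'/'})
def rstripSlash (cs : List Char) : List Char :=
  (cs.reverse.dropWhile (· == '/')).reverse

-- A's for-loop: return the first non-empty component, '/' if none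
def firstNonEmpty : List (List Char) → String
  | [] => "/"
  | comp :: rest => if comp ≠ [] then String.mk comp else firstNonEmpty rest

def get_first_path (path : String) : String :=
  let p1 := PySem.Chars.strip path.toList
  let p2 := rstripSlash p1
  let comps := PySem.Chars.splitOn p2 ['/']
  firstNonEmpty comps

-- ===== PORT B =====
-- str.lstrip('/'): drop leading '/' characters (hand port, exact: the stripped set is {'/'})
def lstripSlash (cs : List Char) : List Char :=
  cs.dropWhile (· == '/')

def get_first_path_alt (path : String) : String :=
  let trimmed := lstripSlash (rstripSlash (PySem.Chars.strip path.toList))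
  let i := PySem.Chars.find trimmed ['/']
  let first := if i < 0 then trimmed else PySem.Chars.slice trimmed none (some i)
  if first = [] then "/" else String.mk first

-- ===== PRECONDITION & SPEC =====
def Spec_get_first_path (path : String) (out : String) : Prop := out = get_first_path_alt path
instance (path : String) (out : String) : Decidable (Spec_get_first_path path out) := by unfold Spec_get_first_path; infer_instance

-- ===== CLAIM (what is proved, stated in full; the proofs are below) =====
def Claim_equal_get_first_path : Prop := ∀ (path : String), Dom_get_first_path path → Spec_get_first_path path (get_first_path path)

-- ===== LEMMAS AND PROOFS =====

theorem findGo_single (c : Char) : ∀ (u : List Char) (k : ℕ),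
    PySem.Chars.find.go [c] u k =
      if c ∈ u then (k : ℤ) + (u.takeWhile (· != c)).length else -1 := by
  intro u
  induction u with
  | nil => intro k; simp [PySem.Chars.find.go]
  | cons d t ih =>
    intro k
    rw [PySem.Chars.find.go]
    by_cases h : d = c
    · subst h
      simp [List.isPrefixOf, List.takeWhile]
    · have hc : c ≠ d := Ne.symm h
      have hne : ([c].isPrefixOf (d :: t)) = false := by
        simp [List.isPrefixOf]; exact hc
      simp only [hne, if_false, Bool.false_eq_true]
      rw [ih]
      by_cases hm : c ∈ t
      · simp [List.mem_cons, hm, List.takeWhile_cons, bne, h]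
        push_cast; ring
      · simp [List.mem_cons, hc, hm]

theorem find_single (c : Char) (u : List Char) :
    PySem.Chars.find u [c] =
      if c ∈ u then ((u.takeWhile (· != c)).length : ℤ) else -1 := by
  have := findGo_single c u 0
  simpa [PySem.Chars.find] using this

theorem splitGo (c : Char) : ∀ (fuel : ℕ) (l cur : List Char) (acc : List (List Char)),
    l.length < fuel →
    PySem.Chars.splitOn.go [c] fuel l cur acc =
      acc.reverse ++ (List.splitOnP (· == c) l).modifyHead (cur.reverse ++ ·) := by
  intro fuel
  induction fuel with
  | zero => intro l cur acc h; omega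
  | succ n ih =>
    intro l cur acc h
    cases l with
    | nil =>
      rw [PySem.Chars.splitOn.go]
      · simp [List.splitOnP_nil]
      · omega
    | cons d t =>
      rw [PySem.Chars.splitOn.go]
      by_cases hd : d = c
      · subst hd
        have hp : ([d].isPrefixOf (d :: t)) = true := by simp [List.isPrefixOf]
        simp only [hp, if_true, List.length_cons, List.length_singleton, List.drop_succ_cons, List.drop_zero, List.length_nil]
        rw [ih t [] (cur.reverse :: acc) (Nat.lt_of_succ_lt_succ h)]
        simp [List.splitOnP_cons]
        rw [show (fun x : List Char => x) = id from rfl, List.modifyHead_id]; rfl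
      · have hp : ([c].isPrefixOf (d :: t)) = false := by
          simp [List.isPrefixOf]; exact Ne.symm hd
        simp only [hp, Bool.false_eq_true, if_false]
        rw [ih t (d :: cur) acc (Nat.lt_of_succ_lt_succ h)]
        cases hEq : List.splitOnP (· == c) t with
        | nil => exact absurd hEq (List.splitOnP_ne_nil _ t)
        | cons hH hT => simp [List.splitOnP_cons, hd, hEq]

theorem splitOn_single (c : Char) (l : List Char) :
    PySem.Chars.splitOn l [c] = List.splitOnP (· == c) l := by
  unfold PySem.Chars.splitOn
  rw [splitGo c (l.length + 1) l [] [] (Nat.lt_succ_self _)]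
  cases hEq : List.splitOnP (· == c) l with
  | nil => exact absurd hEq (List.splitOnP_ne_nil _ l)
  | cons a b => simp

theorem headI_splitOnP (c : Char) : ∀ (t : List Char),
    (List.splitOnP (· == c) t).headI = t.takeWhile (· != c) := by
  intro t
  induction t with
  | nil => simp [List.splitOnP_nil]
  | cons d t ih =>
    by_cases hd : d = c
    · subst hd; simp [List.splitOnP_cons, List.takeWhile_cons]
    · cases hEq : List.splitOnP (· == c) t with
      | nil => exact absurd hEq (List.splitOnP_ne_nil _ t)
      | cons hH hT =>
        rw [hEq] at ih
        simp only [List.splitOnP_cons, hd, beq_iff_eq, if_false, hEq,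
          List.modifyHead_cons, List.takeWhile_cons]
        simp [hd, bne]
        simpa using ih

-- B's "first = trimmed if i < 0 else trimmed[:i]" is the longest slash-free prefix
theorem bfirst (c : Char) (u : List Char) :
    (if PySem.Chars.find u [c] < 0 then u
     else PySem.Chars.slice u none (some (PySem.Chars.find u [c]))) =
      u.takeWhile (· != c) := by
  rw [find_single]
  by_cases hm : c ∈ u
  · simp only [hm, if_true]
    rw [if_neg (by omega)]
    have hpre : u.takeWhile (· != c) <+: u := List.takeWhile_prefix _
    rw [PySem.Chars.slice_eq_listSlice, PySem.List.slice_to u (Int.natCast_nonneg _)]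
    rw [Int.toNat_natCast]
    exact (List.prefix_iff_eq_take.mp hpre).symm
  · simp only [hm, if_false]
    rw [if_pos (by norm_num)]
    symm
    rw [List.takeWhile_eq_self_iff]
    intro a ha
    simp [bne]
    exact fun h => hm (h ▸ ha)

theorem main_loop (t : List Char) :
    firstNonEmpty (List.splitOnP (· == '/') t) =
      (if (t.dropWhile (· == '/')).takeWhile (· != '/') = [] then "/"
       else String.mk ((t.dropWhile (· == '/')).takeWhile (· != '/'))) := by
  induction t with
  | nil => simp [List.splitOnP_nil, firstNonEmpty]
  | cons d t ih =>
    by_cases hd : d = '/'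
    · subst hd
      simpa [List.splitOnP_cons, firstNonEmpty, List.dropWhile_cons] using ih
    · cases hEq : List.splitOnP (· == '/') t with
      | nil => exact absurd hEq (List.splitOnP_ne_nil _ t)
      | cons hH hT =>
        have hhead : hH = t.takeWhile (· != '/') := by
          have := headI_splitOnP '/' t
          rw [hEq] at this; simpa using this
        simp only [List.splitOnP_cons, hd, beq_iff_eq, if_false, hEq, List.modifyHead_cons]
        simp [firstNonEmpty, List.dropWhile_cons, hd, List.takeWhile_cons, bne, hhead]

-- ===== VERDICT (by name: the statement is the Claim_ definition above) =====
theorem get_first_path_spec : Claim_equal_get_first_path := by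
  intro path _
  unfold Spec_get_first_path get_first_path get_first_path_alt lstripSlash
  simp only
  rw [splitOn_single, main_loop, bfirst]
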